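-- pv_equiv track=rewrite | github.com/cxygiao/Transmission-Cost-Optimization-Dynamic-Look-Ahead | Utils/min_global_gate_num.py | group_nodes_by_partition
-- ===== SOURCE A (Python) =====
-- from collections import defaultdict
-- from typing import List, Tuple
--
-- def group_nodes_by_partition(partition_labels: List[int], node_labels: List[str]) -> Tuple[List[int], str]:
--     """
--     将节点按分区编号分组，返回每个分区的大小和按分区拼接的节点字符串。
--
--     :param partition_labels: 每个节点所属的分区编号
--     :param node_labels: 节点名称列表
--     :return: (分区大小列表, 拼接后的节点字符串)
--     """
--     if len(partition_labels) != len(node_labels):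
--         raise ValueError("partition_labels 和 node_labels 长度必须一致。")
--
--     partition_dict = defaultdict(list)
--     for node, partition in zip(node_labels, partition_labels):
--         partition_dict[partition].append(node)
--
--     # 按照分区编号排序
--     sorted_partitions = sorted(partition_dict.items())
--
--     # 构造结果
--     partition_sizes = [len(nodes) for _, nodes in sorted_partitions]
--     concatenated_nodes = ''.join([node for _, nodes in sorted_partitions for node in nodes])
--
--     return partition_sizes, concatenated_nodes
-- ===== SOURCE B (Python) =====
-- from itertools import groupby
-- from typing import List, Tuple
--
-- def group_nodes_by_partition(partition_labels: List[int], node_labels: List[str]) -> Tuple[List[int], str]: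
--     if len(partition_labels) != len(node_labels):
--         raise ValueError("partition_labels 和 node_labels 长度必须一致。")
--     pairs = sorted(zip(partition_labels, node_labels), key=lambda p: p[0])
--     partition_sizes = []
--     parts = []
--     for _, grp in groupby(pairs, key=lambda p: p[0]):
--         nodes = [node for _, node in grp]
--         partition_sizes.append(len(nodes))
--         parts.extend(nodes)
--     return partition_sizes, ''.join(parts)
-- ===== Notes on version B (the rewrite author's own statement) =====
-- stated objective: alternative
-- what changed: Replaces the defaultdict hash-grouping followed by a sort of the dict items with a single stable sort of (partition, node) pairs by partition and one linear itertools.groupby pass.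
import Mathlib
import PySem

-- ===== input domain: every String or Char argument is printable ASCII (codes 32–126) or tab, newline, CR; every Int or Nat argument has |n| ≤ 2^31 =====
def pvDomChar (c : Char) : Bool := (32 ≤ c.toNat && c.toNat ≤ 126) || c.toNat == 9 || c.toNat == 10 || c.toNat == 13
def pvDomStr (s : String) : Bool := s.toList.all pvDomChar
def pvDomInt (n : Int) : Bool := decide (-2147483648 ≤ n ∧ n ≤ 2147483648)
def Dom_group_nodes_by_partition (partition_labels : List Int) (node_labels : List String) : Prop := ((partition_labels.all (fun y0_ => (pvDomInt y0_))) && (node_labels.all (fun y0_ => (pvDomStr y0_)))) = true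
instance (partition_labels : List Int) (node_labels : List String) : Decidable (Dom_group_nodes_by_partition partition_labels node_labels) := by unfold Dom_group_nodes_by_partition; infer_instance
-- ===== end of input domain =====

-- B replaces A's defaultdict hash-grouping + item sort with one stable sort of (partition, node)
-- pairs by partition followed by a single linear groupby pass (objective: alternative).


-- ===== PORT A =====
-- Python A: defaultdict(list) grouping over zip(node_labels, partition_labels), then
-- sorted(partition_dict.items()).  The dict's keys are distinct, so Python's tuple
-- comparison inside sorted(...) never reaches the second component: sorting the items
-- by the key alone is exact here.
def group_nodes_by_partition (partition_labels : List Int) (node_labels : List String) : List Int × String :=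
  if partition_labels.length ≠ node_labels.length then ([], "")  -- ValueError; excluded by Pre_
  else
    let d : PySem.Dict Int (List String) :=
      (node_labels.zip partition_labels).foldl
        (fun d np => d.modify np.2 [] (fun ns => ns ++ [np.1])) PySem.Dict.empty
    let sp := PySem.List.sorted d.items (fun p => p.1) false
    (sp.map (fun p => (p.2.length : Int)),
     PySem.Str.join "" (sp.flatMap (fun p => p.2)))

-- ===== PORT B =====
-- itertools.groupby over the key-sorted pair list: each group is the maximal run of
-- consecutive pairs sharing the head's partition id.
def pvGroups : List (Int × String) → List (List String)
  | [] => []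
  | p :: rest =>
    (p.2 :: (rest.takeWhile (fun q => q.1 == p.1)).map (fun q => q.2)) ::
      pvGroups (rest.dropWhile (fun q => q.1 == p.1))
  termination_by l => l.length
  decreasing_by
    simp only [List.length_cons]
    exact Nat.lt_succ_of_le (List.length_dropWhile_le _ _)

def group_nodes_by_partition_alt (partition_labels : List Int) (node_labels : List String) : List Int × String :=
  if partition_labels.length ≠ node_labels.length then ([], "")  -- ValueError; excluded by Pre_
  else
    let s := PySem.List.sorted (partition_labels.zip node_labels) (fun p => p.1) false
    let gs := pvGroups s
    (gs.map (fun g => (g.length : Int)), PySem.Str.join "" (gs.flatMap (fun g => g)))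

-- ===== PRECONDITION & SPEC =====
-- Pre_ excludes exactly the inputs of unequal lengths, on which Python A (and B) raises ValueError.
def Pre_group_nodes_by_partition (partition_labels : List Int) (node_labels : List String) : Prop :=
  partition_labels.length = node_labels.length
instance (partition_labels : List Int) (node_labels : List String) : Decidable (Pre_group_nodes_by_partition partition_labels node_labels) := by unfold Pre_group_nodes_by_partition; infer_instance

def pvWitness_group_nodes_by_partition : List Int × List String :=
  ([2, 0, 2, 0], ["a", "b", "c", "d"])

def Spec_group_nodes_by_partition (partition_labels : List Int) (node_labels : List String) (out : List Int × String) : Prop := out = group_nodes_by_partition_alt partition_labels node_labels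
instance (partition_labels : List Int) (node_labels : List String) (out : List Int × String) : Decidable (Spec_group_nodes_by_partition partition_labels node_labels out) := by unfold Spec_group_nodes_by_partition; infer_instance

-- ===== CLAIM (what is proved, stated in full; the proofs are below) =====
def Claim_equal_group_nodes_by_partition : Prop := ∀ (partition_labels : List Int) (node_labels : List String), Dom_group_nodes_by_partition partition_labels node_labels → Pre_group_nodes_by_partition partition_labels node_labels → Spec_group_nodes_by_partition partition_labels node_labels (group_nodes_by_partition partition_labels node_labels)

-- ===== LEMMAS AND PROOFS =====

-- `insertBy (key <)` keeps a key-ordered accumulator ordered.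
lemma pvPairwise_insertBy (x : Int × String) :
    ∀ acc : List (Int × String), acc.Pairwise (fun a b => a.1 ≤ b.1) →
      (PySem.List.insertBy (fun a b => decide (a.1 < b.1)) x acc).Pairwise (fun a b => a.1 ≤ b.1) := by
  intro acc
  induction acc with
  | nil => intro _; simp [PySem.List.insertBy]
  | cons y ys ih =>
    intro h
    rw [List.pairwise_cons] at h
    obtain ⟨hy, hys⟩ := h
    simp only [PySem.List.insertBy]
    by_cases hlt : x.1 < y.1
    · simp only [hlt, decide_true, if_true]
      refine List.pairwise_cons.mpr ⟨?_, List.pairwise_cons.mpr ⟨hy, hys⟩⟩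
      intro z hz
      rcases hz with _ | hz
      · exact le_of_lt hlt
      · exact le_trans (le_of_lt hlt) (hy _ (by assumption))
    · simp only [hlt, decide_false, Bool.false_eq_true, if_false]
      refine List.pairwise_cons.mpr ⟨?_, ih hys⟩
      intro z hz
      have h2 := (PySem.List.mem_insertBy (fun a b => decide (a.1 < b.1)) x z ys).mp hz
      rcases h2 with rfl | hz'
      · exact le_of_not_gt hlt
      · exact hy _ hz'

-- Inserting x puts it after all elements of equal key: the key-k filter gains x at the end.
lemma pvFilter_insertBy (x : Int × String) (k : Int) :
    ∀ acc : List (Int × String), acc.Pairwise (fun a b => a.1 ≤ b.1) →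
      (PySem.List.insertBy (fun a b => decide (a.1 < b.1)) x acc).filter (fun p => p.1 == k)
        = if x.1 = k then acc.filter (fun p => p.1 == k) ++ [x]
          else acc.filter (fun p => p.1 == k) := by
  intro acc
  induction acc with
  | nil =>
    intro _
    by_cases hx : x.1 = k <;> simp [PySem.List.insertBy, hx]
  | cons y ys ih =>
    intro h
    rw [List.pairwise_cons] at h
    obtain ⟨hy, hys⟩ := h
    simp only [PySem.List.insertBy]
    by_cases hlt : x.1 < y.1
    · simp only [hlt, decide_true, if_true]
      by_cases hx : x.1 = k
      · have hfilt : (y :: ys).filter (fun p => p.1 == k) = [] := by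
          rw [List.filter_eq_nil_iff]
          intro a ha
          rcases ha with _ | ha
          · simp; omega
          · have := hy _ (by assumption)
            simp; omega
        rw [List.filter_cons]
        simp only [hx, beq_self_eq_true, if_true, hfilt]
        simp [hx]
      · have hxk : (x.1 == k) = false := by simp [hx]
        rw [List.filter_cons]
        simp [hxk, hx]
    · simp only [hlt, decide_false, Bool.false_eq_true, if_false]
      rw [List.filter_cons, List.filter_cons, ih hys]
      by_cases hx : x.1 = k <;> by_cases hyk : y.1 = k <;> simp [hx, hyk]

lemma pvFoldl_filter (k : Int) (l : List (Int × String)) :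
    ∀ acc : List (Int × String), acc.Pairwise (fun a b => a.1 ≤ b.1) →
      (l.foldl (fun acc x => PySem.List.insertBy (fun a b => decide (a.1 < b.1)) x acc) acc).filter
          (fun p => p.1 == k)
        = acc.filter (fun p => p.1 == k) ++ l.filter (fun p => p.1 == k) := by
  induction l with
  | nil => intro acc h; simp
  | cons x xs ih =>
    intro acc h
    simp only [List.foldl_cons]
    rw [ih _ (pvPairwise_insertBy x acc h), pvFilter_insertBy x k acc h, List.filter_cons]
    by_cases hx : x.1 = k <;> simp [hx]

-- Stability of PySem's sort: the key-k elements keep their original order.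
lemma pvFilter_sorted (l : List (Int × String)) (k : Int) :
    (PySem.List.sorted l (fun p => p.1)).filter (fun p => p.1 == k)
      = l.filter (fun p => p.1 == k) := by
  rw [PySem.List.sorted_eq_foldl_insertBy]
  simpa using pvFoldl_filter k l [] (by simp)

-- Two key-ordered lists with the same key-k filter for every k are equal.
lemma pvEq_of_pairwise_filter :
    ∀ l₁ l₂ : List (Int × String), l₁.Pairwise (fun a b => a.1 ≤ b.1) →
      l₂.Pairwise (fun a b => a.1 ≤ b.1) →
      (∀ k, l₁.filter (fun p => p.1 == k) = l₂.filter (fun p => p.1 == k)) →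
      l₁ = l₂ := by
  intro l₁
  induction l₁ with
  | nil =>
    intro l₂ _ _ hf
    cases l₂ with
    | nil => rfl
    | cons b t₂ =>
      exfalso
      have := hf b.1
      simp at this
  | cons a t₁ ih =>
    intro l₂ h₁ h₂ hf
    cases l₂ with
    | nil =>
      exfalso
      have := hf a.1
      simp at this
    | cons b t₂ =>
      rw [List.pairwise_cons] at h₁ h₂
      obtain ⟨ha, ht₁⟩ := h₁
      obtain ⟨hb, ht₂⟩ := h₂
      have hab : a.1 = b.1 := by
        have hmem1 : a ∈ (b :: t₂).filter (fun p => p.1 == a.1) := by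
          rw [← hf a.1]; simp
        have hmem2 : b ∈ (a :: t₁).filter (fun p => p.1 == b.1) := by
          rw [hf b.1]; simp
        have e1 : b.1 ≤ a.1 := by
          rcases List.mem_cons.mp (List.mem_filter.mp hmem1).1 with heq | hm
          · rw [heq]
          · exact hb _ hm
        have e2 : a.1 ≤ b.1 := by
          rcases List.mem_cons.mp (List.mem_filter.mp hmem2).1 with heq | hm
          · rw [heq]
          · exact ha _ hm
        exact le_antisymm e2 e1
      have h3 := hf a.1
      rw [List.filter_cons, List.filter_cons] at h3
      have hba : (b.1 == a.1) = true := by simp [hab]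
      simp only [beq_self_eq_true, if_true, hba] at h3
      obtain ⟨hhead, htail⟩ := List.cons.inj h3
      subst hhead
      have htails : ∀ k, t₁.filter (fun p => p.1 == k) = t₂.filter (fun p => p.1 == k) := by
        intro k
        by_cases hk : a.1 = k
        · rw [← hk]; exact htail
        · have h4 := hf k
          rw [List.filter_cons, List.filter_cons] at h4
          have hak : (a.1 == k) = false := by simp [hk]
          simpa [hak] using h4
      rw [ih t₂ ht₁ ht₂ htails]

lemma pvPairwise_flatMap_filter (ks : List Int) (l : List (Int × String))
    (hks : ks.Pairwise (· < ·)) :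
    (ks.flatMap (fun k => l.filter (fun p => p.1 == k))).Pairwise (fun a b => a.1 ≤ b.1) := by
  rw [List.pairwise_flatMap]
  constructor
  · intro k _
    apply List.pairwise_of_forall_mem_list
    intro a ha b hb
    rw [List.mem_filter] at ha hb
    have h1 : a.1 = k := by simpa using ha.2
    have h2 : b.1 = k := by simpa using hb.2
    omega
  · apply hks.imp_of_mem
    intro k k' hk hk' hlt a ha b hb
    rw [List.mem_filter] at ha hb
    have h1 : a.1 = k := by simpa using ha.2
    have h2 : b.1 = k' := by simpa using hb.2
    omega

lemma pvFlatMap_ite (k : Int) (f : Int → List (Int × String)) :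
    ∀ ks : List Int, ks.Nodup →
      ks.flatMap (fun k' => if k' = k then f k' else []) = if k ∈ ks then f k else [] := by
  intro ks
  induction ks with
  | nil => intro _; simp
  | cons k₀ ks ih =>
    intro hnd
    rw [List.nodup_cons] at hnd
    obtain ⟨hk₀, hnd⟩ := hnd
    rw [List.flatMap_cons, ih hnd]
    by_cases h : k₀ = k
    · subst h
      simp [hk₀]
    · simp [h, Ne.symm h]

-- The stable sort of the pair list is the concatenation, over the sorted distinct keys,
-- of the original key-k subsequences.
lemma pvSorted_zip_eq_flatMap (partition_labels : List Int) (node_labels : List String)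
    (h : partition_labels.length = node_labels.length) :
    PySem.List.sorted (partition_labels.zip node_labels) (fun p => p.1)
      = (PySem.List.sorted (PySem.Set.ofList partition_labels) (fun k => k)).flatMap
          (fun k => (partition_labels.zip node_labels).filter (fun p => p.1 == k)) := by
  set zp := partition_labels.zip node_labels with hzp
  set ks := PySem.List.sorted (PySem.Set.ofList partition_labels) (fun k => k) with hks
  have hklt : ks.Pairwise (· < ·) := PySem.List.sorted_ofList_pairwise_lt _
  have hknd : ks.Nodup := hklt.imp (fun hab => ne_of_lt hab)
  apply pvEq_of_pairwise_filter
  · exact PySem.List.sorted_pairwise zp (fun p => p.1)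
  · exact pvPairwise_flatMap_filter ks zp hklt
  · intro k
    rw [pvFilter_sorted, List.filter_flatMap]
    have hinner : ∀ k' ∈ ks, (zp.filter (fun p => p.1 == k')).filter (fun p => p.1 == k)
        = if k' = k then zp.filter (fun p => p.1 == k') else [] := by
      intro k' _
      by_cases hkk : k' = k
      · subst hkk
        simp [List.filter_filter]
      · rw [List.filter_eq_nil_iff.mpr, if_neg hkk]
        intro p hp
        rw [List.mem_filter] at hp
        have : p.1 = k' := by simpa using hp.2
        simp [this, hkk]
    rw [List.flatMap_congr hinner, pvFlatMap_ite k _ ks hknd]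
    by_cases hmem : k ∈ ks
    · simp [hmem]
    · rw [if_neg hmem]
      refine List.filter_eq_nil_iff.mpr ?_
      intro p hp
      have hp1 : p.1 ∈ partition_labels := by
        have := List.map_fst_zip (l₁ := partition_labels) (l₂ := node_labels) (le_of_eq h)
        rw [← this]
        exact List.mem_map_of_mem hp
      have hmem' : p.1 ∈ ks := by
        rw [hks, PySem.List.mem_sorted, PySem.Set.mem_ofList]
        exact hp1
      intro hc
      have : k ∈ ks := by
        have he : p.1 = k := by simpa using hc
        exact he ▸ hmem'
      exact hmem this

-- A's grouping dict, as an items list.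
lemma pvItems_eq (partition_labels : List Int) (node_labels : List String)
    (h : partition_labels.length = node_labels.length) :
    ((node_labels.zip partition_labels).foldl
        (fun d np => d.modify np.2 [] (fun ns => ns ++ [np.1]))
        (PySem.Dict.empty : PySem.Dict Int (List String))).items
      = (PySem.Set.ofList partition_labels).map
          (fun k => (k, ((partition_labels.zip node_labels).filter (fun p => p.1 == k)).map
            (fun p => p.2))) := by
  have hswap : (node_labels.zip partition_labels).foldl
      (fun d np => d.modify np.2 [] (fun ns => ns ++ [np.1]))
      (PySem.Dict.empty : PySem.Dict Int (List String))
      = (partition_labels.zip node_labels).foldl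
        (fun d p => d.modify p.1 [] (fun ns => ns ++ [p.2]))
        (PySem.Dict.empty : PySem.Dict Int (List String)) := by
    rw [← List.zip_swap node_labels partition_labels, List.foldl_map]
    rfl
  rw [hswap]
  set d := (partition_labels.zip node_labels).foldl
      (fun d p => d.modify p.1 [] (fun ns => ns ++ [p.2]))
      (PySem.Dict.empty : PySem.Dict Int (List String)) with hd
  have hnd : d.keys.Nodup := by
    rw [hd]
    exact PySem.Dict.nodup_keys_foldl_modify_key (partition_labels.zip node_labels)
      (fun p : Int × String => p.1) []
      (fun (_ : PySem.Dict Int (List String)) (p : Int × String) (ns : List String) => ns ++ [p.2])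
      PySem.Dict.empty (by simp [PySem.Dict.keys_empty])
  have hkeys : d.keys = PySem.Set.ofList partition_labels := by
    rw [hd]
    rw [PySem.Dict.keys_foldl_modify_key (partition_labels.zip node_labels)
      (fun p : Int × String => p.1) []
      (fun (_ : PySem.Dict Int (List String)) (p : Int × String) (ns : List String) => ns ++ [p.2])
      PySem.Dict.empty]
    rw [List.map_fst_zip (le_of_eq h)]
    simp [PySem.Dict.keys_empty]
    rfl
  rw [PySem.Dict.items_eq_map_keys d hnd [], hkeys]
  apply List.map_congr_left
  intro k _
  rw [hd, PySem.Dict.getD_foldl_modify_append]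
  simp [PySem.Dict.getD_empty]

lemma pvTakeDropAppend (p : Int × String → Bool) :
    ∀ (xs ys : List (Int × String)), (∀ x ∈ xs, p x = true) → (∀ y ∈ ys, p y = false) →
      (xs ++ ys).takeWhile p = xs ∧ (xs ++ ys).dropWhile p = ys := by
  intro xs
  induction xs with
  | nil =>
    intro ys _ hys
    cases ys with
    | nil => simp
    | cons y t =>
      have := hys y (by simp)
      simp [this]
  | cons x xt ih =>
    intro ys hxs hys
    have hx := hxs x (by simp)
    have ih' := ih ys (fun z hz => hxs z (by simp [hz])) hys
    simp [hx, ih'.1, ih'.2]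

-- B's groupby pass on the key-chunked list yields exactly one group per distinct key.
lemma pvGroups_flatMap (zp : List (Int × String)) :
    ∀ ks : List Int, ks.Nodup → (∀ k ∈ ks, ∃ p ∈ zp, p.1 = k) →
      pvGroups (ks.flatMap (fun k => zp.filter (fun p => p.1 == k)))
        = ks.map (fun k => (zp.filter (fun p => p.1 == k)).map (fun p => p.2)) := by
  intro ks
  induction ks with
  | nil => intro _ _; simp [pvGroups]
  | cons k ks ih =>
    intro hnd hcov
    rw [List.nodup_cons] at hnd
    obtain ⟨hk, hnd⟩ := hnd
    obtain ⟨p₀, hp₀, hp₀k⟩ := hcov k (by simp)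
    obtain ⟨q, cs, hchunk⟩ : ∃ q cs, zp.filter (fun p => p.1 == k) = q :: cs := by
      cases hc : zp.filter (fun p => p.1 == k) with
      | nil =>
        exfalso
        have : p₀ ∈ zp.filter (fun p => p.1 == k) := by
          rw [List.mem_filter]
          exact ⟨hp₀, by simp [hp₀k]⟩
        rw [hc] at this; simp at this
      | cons q cs => exact ⟨q, cs, rfl⟩
    have hall : ∀ x ∈ q :: cs, (x.1 == k) = true := by
      intro x hx
      rw [← hchunk] at hx
      exact (List.mem_filter.mp hx).2
    have hq1 : q.1 = k := by simpa using hall q (by simp)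
    have hrestfail : ∀ y ∈ ks.flatMap (fun k' => zp.filter (fun p => p.1 == k')),
        (y.1 == q.1) = false := by
      intro y hy
      rw [List.mem_flatMap] at hy
      obtain ⟨k', hk', hyf⟩ := hy
      have hy1 : y.1 = k' := by simpa using (List.mem_filter.mp hyf).2
      have hne : y.1 ≠ k := fun hh => hk ((hh ▸ hy1) ▸ hk')
      simp [hq1, hne]
    have hcs : ∀ x ∈ cs, ((x.1 == q.1) : Bool) = true := by
      intro x hx
      have := hall x (by simp [hx])
      simp [hq1] at this ⊢
      exact this
    have htd := pvTakeDropAppend (fun x => x.1 == q.1) cs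
      (ks.flatMap (fun k' => zp.filter (fun p => p.1 == k'))) hcs hrestfail
    rw [List.flatMap_cons, hchunk, List.cons_append, pvGroups]
    rw [htd.1, htd.2]
    rw [List.map_cons, ih hnd (fun k' hk' => hcov k' (by simp [hk']))]
    congr 1
    rw [hchunk, List.map_cons]

lemma pvMain (partition_labels : List Int) (node_labels : List String)
    (hpre : partition_labels.length = node_labels.length) :
    group_nodes_by_partition partition_labels node_labels
      = group_nodes_by_partition_alt partition_labels node_labels := by
  unfold group_nodes_by_partition group_nodes_by_partition_alt
  rw [if_neg (by omega), if_neg (by omega)]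
  set ks := PySem.List.sorted (PySem.Set.ofList partition_labels) (fun k => k) with hksdef
  set zp := partition_labels.zip node_labels with hzp
  have hklt : ks.Pairwise (· < ·) := PySem.List.sorted_ofList_pairwise_lt _
  have hknd : ks.Nodup := hklt.imp (fun hab => ne_of_lt hab)
  have hsp : PySem.List.sorted ((node_labels.zip partition_labels).foldl
        (fun d np => d.modify np.2 [] (fun ns => ns ++ [np.1]))
        (PySem.Dict.empty : PySem.Dict Int (List String))).items (fun p => p.1)
      = ks.map (fun k => (k, (zp.filter (fun p => p.1 == k)).map (fun p => p.2))) := by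
    rw [pvItems_eq partition_labels node_labels hpre]
    apply PySem.List.sorted_eq_of_perm_of_pairwise_lt
    · exact (PySem.List.sorted_perm _ _ _).map _
    · rw [List.pairwise_map]
      exact hklt
  have hs : PySem.List.sorted zp (fun p => p.1)
      = ks.flatMap (fun k => zp.filter (fun p => p.1 == k)) :=
    pvSorted_zip_eq_flatMap partition_labels node_labels hpre
  have hcov : ∀ k ∈ ks, ∃ p ∈ zp, p.1 = k := by
    intro k hk
    have hkpl : k ∈ partition_labels := by
      rw [hksdef, PySem.List.mem_sorted, PySem.Set.mem_ofList] at hk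
      exact hk
    have : k ∈ zp.map Prod.fst := by
      rw [hzp, List.map_fst_zip (le_of_eq hpre)]
      exact hkpl
    obtain ⟨p, hp, hpk⟩ := List.mem_map.mp this
    exact ⟨p, hp, hpk⟩
  have hgroups : pvGroups (PySem.List.sorted zp (fun p => p.1))
      = ks.map (fun k => (zp.filter (fun p => p.1 == k)).map (fun p => p.2)) := by
    rw [hs]
    exact pvGroups_flatMap zp ks hknd hcov
  simp only [hsp, hgroups]
  refine Prod.ext ?_ ?_ <;> simp [List.map_map, List.flatMap_map]

-- ===== VERDICT (by name: the statement is the Claim_ definition above) =====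
theorem group_nodes_by_partition_spec : Claim_equal_group_nodes_by_partition := by
  intro partition_labels node_labels _ hpre
  exact pvMain partition_labels node_labels hpre
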